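-- pv_equiv track=rewrite | github.com/Azab007/Data-Structures-and-Algorithms-Specialization | algorithms on strings/week1/suffix_tree/suffix_tree.py | Suffix_tree
-- ===== SOURCE A (Python) =====
-- def Suffix_tree(trie):
--     result = []
--
--     def dfs(index, text_string):
--         if index not in trie and text_string:
--             result.append(text_string) # If end of the tree, then append
--             return
--         current_branch = trie[index]
--         if len(current_branch) > 1 and text_string:
--             result.append(text_string) # If branching out, append till last branch and reset text string
--             text_string = ""
--         for symbol, ind in current_branch.items():
--             dfs(ind, text_string + symbol)
--
--     dfs(0, "")
--     return result
-- ===== SOURCE B (Python) =====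
-- def Suffix_tree(trie):
--     result = []
--     stack = [(0, "")]
--     while stack:
--         index, text = stack.pop()
--         if index not in trie and text:
--             result.append(text)
--             continue
--         branch = trie[index]
--         if len(branch) > 1 and text:
--             result.append(text)
--             text = ""
--         for symbol, child in reversed(branch.items()):
--             stack.append((child, text + symbol))
--     return result
-- ===== Notes on version B (the rewrite author's own statement) =====
-- stated objective: alternative
-- what changed: Replaced the recursive closure-based DFS (nested def mutating an outer result list) with an explicit stack of (index, text) frames processed in a single while loop, pushing children in reversed order to preserve the output sequence.
import Mathlib
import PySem

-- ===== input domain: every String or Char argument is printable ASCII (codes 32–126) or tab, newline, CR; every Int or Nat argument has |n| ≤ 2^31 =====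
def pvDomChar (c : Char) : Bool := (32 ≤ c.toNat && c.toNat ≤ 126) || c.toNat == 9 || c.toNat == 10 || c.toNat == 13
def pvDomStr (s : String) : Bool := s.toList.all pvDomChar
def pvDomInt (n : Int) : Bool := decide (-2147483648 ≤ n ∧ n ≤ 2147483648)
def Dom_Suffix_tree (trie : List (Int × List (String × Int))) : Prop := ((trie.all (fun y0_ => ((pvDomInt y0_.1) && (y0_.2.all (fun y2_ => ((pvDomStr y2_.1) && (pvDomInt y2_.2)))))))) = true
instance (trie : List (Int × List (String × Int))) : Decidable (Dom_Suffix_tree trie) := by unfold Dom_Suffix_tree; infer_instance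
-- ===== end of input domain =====

-- B replaces A's recursive closure DFS by an explicit-stack while loop (same values, no recursion);
-- equivalence of the RETURN values is what is proved (A mutates only its local result list).

-- dict lookup, first match (the association list stands for a Python dict, lookup = first match)
def findBranch : List (Int × List (String × Int)) → Int → Option (List (String × Int))
  | [], _ => none
  | (k, v) :: rest, i => if k = i then some v else findBranch rest i

-- ===== PORT A =====
-- fuel-totalised transliteration of A's nested dfs; under Pre_ the fuel trie.length+1
-- strictly exceeds the recursion depth, so the fuel-0 branch is never taken.
-- (where Python raises KeyError — index absent and text empty — the port returns [];
-- Pre_ excludes those inputs)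
def dfsA (trie : List (Int × List (String × Int))) : Nat → Int → String → List String
  | 0, _, _ => []
  | f + 1, i, t =>
    match findBranch trie i with
    | none => if t ≠ "" then [t] else []
    | some br =>
      let pre := if 1 < br.length ∧ t ≠ "" then [t] else []
      let t' := if 1 < br.length ∧ t ≠ "" then "" else t
      pre ++ br.foldl (fun r q => r ++ dfsA trie f q.2 (t' ++ q.1)) []

def Suffix_tree (trie : List (Int × List (String × Int))) : List String :=
  dfsA trie (trie.length + 1) 0 ""

-- ===== PORT B =====
-- fuel for the while loop: total number of frames ever pushed (one unit per iteration);
-- it only totalises the loop, the computed value never depends on it under Pre_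
def costF (trie : List (Int × List (String × Int))) : Nat → Int → Nat
  | 0, _ => 1
  | f + 1, i =>
    match findBranch trie i with
    | none => 1
    | some br => 1 + (br.map (fun q => costF trie f q.2)).sum

-- the Lean stack keeps its top at the HEAD (Python appends/pops at the end);
-- 'push the children in reversed order' therefore folds br.reverse with cons
def loopB (trie : List (Int × List (String × Int))) : Nat → List (Int × String) → List String → List String
  | _, [], res => res
  | 0, _ :: _, res => res
  | f + 1, (i, t) :: rest, res =>
    match findBranch trie i with
    | none => if t ≠ "" then loopB trie f rest (res ++ [t]) else res  -- else: Python raises KeyError (outside Pre_)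
    | some br =>
      let res' := if 1 < br.length ∧ t ≠ "" then res ++ [t] else res
      let t' := if 1 < br.length ∧ t ≠ "" then "" else t
      loopB trie f (br.reverse.foldl (fun st q => (q.2, t' ++ q.1) :: st) rest) res'

def Suffix_tree_alt (trie : List (Int × List (String × Int))) : List String :=
  loopB trie (costF trie (trie.length + 1) 0) [(0, "")] []

-- ===== PRECONDITION & SPEC =====
-- generic saturating closure of a finite successor graph: repeatedly add the successors
-- of already-collected elements until none is new (the fuel passed below always suffices)
def closNew {α : Type} [DecidableEq α] (nexts : α → List α) (R : List α) : List α :=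
  ((R.flatMap nexts).filter (fun c => decide (c ∉ R))).dedup

def closIter {α : Type} [DecidableEq α] (nexts : α → List α) : Nat → List α → List α
  | 0, R => R
  | f + 1, R => if closNew nexts R = [] then R else closIter nexts f (R ++ closNew nexts R)

-- the branch stored under key i (first matching entry), [] when i is not a key
def branchOf (trie : List (Int × List (String × Int))) (i : Int) : List (String × Int) :=
  ((((trie.filter (fun p => decide (p.1 = i))).head?).map Prod.snd)).getD []

-- key-successors: the children of node i that are themselves keys of the trie
def nextsIdx (trie : List (Int × List (String × Int))) (i : Int) : List Int :=
  (branchOf trie i).filterMap (fun q => if q.2 ∈ trie.map Prod.fst then some q.2 else none)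

-- the keys reachable from i through key-to-key edges
def reachSet (trie : List (Int × List (String × Int))) (i : Int) : List Int :=
  closIter (nextsIdx trie) (trie.length + 1) [i]

-- DFS states (i, e): node i is visited on some root path with accumulated text empty (e = true)
-- or nonempty (e = false); a branching node resets the text, an edge appends its label
def nextsSt (trie : List (Int × List (String × Int))) (st : Int × Bool) : List (Int × Bool) :=
  (branchOf trie st.1).filterMap (fun q =>
    if q.2 ∈ trie.map Prod.fst then
      some (q.2, (st.2 || decide (1 < (branchOf trie st.1).length)) && (q.1 == "")) else none)

def States (trie : List (Int × List (String × Int))) : List (Int × Bool) :=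
  closIter (nextsSt trie) (2 * trie.length + 1) [((0 : Int), true)]

-- Pre_ holds exactly when the Python A RETURNS: the root key 0 exists, no key is reachable
-- from one of its own children (else A recurses forever, RecursionError), and no missing
-- child index is ever reached with empty accumulated text (else trie[index] raises KeyError).
def Pre_Suffix_tree (trie : List (Int × List (String × Int))) : Prop :=
  (0 : Int) ∈ trie.map Prod.fst ∧
    ∀ st ∈ States trie, ∀ q ∈ branchOf trie st.1,
      (q.2 ∈ trie.map Prod.fst → st.1 ∉ reachSet trie q.2) ∧
      (q.2 ∉ trie.map Prod.fst →
        ¬ ((st.2 = true ∨ 1 < (branchOf trie st.1).length) ∧ q.1 = ""))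

instance (trie : List (Int × List (String × Int))) : Decidable (Pre_Suffix_tree trie) := by
  unfold Pre_Suffix_tree; infer_instance

def pvWitness_Suffix_tree : (List (Int × List (String × Int))) :=
  [(0, [("a", 1), ("b", 2)]), (1, [("c", 3)])]

def Spec_Suffix_tree (trie : List (Int × List (String × Int))) (out : List String) : Prop := out = Suffix_tree_alt trie
instance (trie : List (Int × List (String × Int))) (out : List String) : Decidable (Spec_Suffix_tree trie out) := by unfold Spec_Suffix_tree; infer_instance

-- ===== CLAIM (what is proved, stated in full; the proofs are below) =====
def Claim_equal_Suffix_tree : Prop := ∀ (trie : List (Int × List (String × Int))), Dom_Suffix_tree trie → Pre_Suffix_tree trie → Spec_Suffix_tree trie (Suffix_tree trie)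

-- ===== LEMMAS AND PROOFS =====

lemma countP_lt_of_exists {α : Type} (l : List α) (p q : α → Bool)
    (himp : ∀ x ∈ l, q x = true → p x = true)
    (hex : ∃ x ∈ l, p x = true ∧ q x = false) : l.countP q < l.countP p := by
  induction l with
  | nil => obtain ⟨x, hx, _⟩ := hex; simp at hx
  | cons a tl ih =>
    obtain ⟨x, hx, hpx, hqx⟩ := hex
    have himp' : ∀ y ∈ tl, q y = true → p y = true :=
      fun y hy => himp y (List.mem_cons_of_mem _ hy)
    rcases List.mem_cons.1 hx with rfl | hx
    · have h1 : tl.countP q ≤ tl.countP p := List.countP_mono_left himp'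
      simp only [List.countP_cons, hpx, hqx]
      simp
      omega
    · have h1 := ih himp' ⟨x, hx, hpx, hqx⟩
      have hle : (if q a = true then 1 else 0) ≤ (if p a = true then 1 else 0) := by
        by_cases hqa : q a = true
        · simp [hqa, himp a List.mem_cons_self hqa]
        · simp [hqa]
      simp only [List.countP_cons]
      omega

lemma mem_closNew {α : Type} [DecidableEq α] {nexts : α → List α} {R : List α} {c : α}
    (h : c ∈ closNew nexts R) : c ∉ R ∧ ∃ a ∈ R, c ∈ nexts a := by
  unfold closNew at h
  rw [List.mem_dedup, List.mem_filter] at h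
  obtain ⟨h1, h2⟩ := h
  simp only [decide_eq_true_eq] at h2
  exact ⟨h2, List.mem_flatMap.1 h1⟩

lemma closNew_decreases {α : Type} [DecidableEq α] (nexts : α → List α) (U R : List α)
    (hU : ∀ a c, c ∈ nexts a → c ∈ U)
    (h : ¬ closNew nexts R = []) :
    U.countP (fun k => decide (k ∉ R ++ closNew nexts R)) < U.countP (fun k => decide (k ∉ R)) := by
  apply countP_lt_of_exists
  · intro x _ hx
    simp only [decide_eq_true_eq] at hx ⊢
    exact fun hxr => hx (List.mem_append.2 (Or.inl hxr))
  · obtain ⟨c, hc⟩ := List.exists_mem_of_ne_nil (closNew nexts R) h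
    obtain ⟨hcR, a, haR, hca⟩ := mem_closNew hc
    refine ⟨c, hU a c hca, by simpa using hcR, ?_⟩
    simp only [decide_eq_false_iff_not, Decidable.not_not]
    exact List.mem_append.2 (Or.inr hc)

lemma subset_closIter {α : Type} [DecidableEq α] (nexts : α → List α) :
    ∀ f R, ∀ x ∈ R, x ∈ closIter nexts f R := by
  intro f
  induction f with
  | zero => intro R x hx; exact hx
  | succ f ih =>
    intro R x hx
    simp only [closIter]
    split
    · exact hx
    · exact ih _ x (List.mem_append.2 (Or.inl hx))

lemma closNew_closIter_nil {α : Type} [DecidableEq α] (nexts : α → List α) (U : List α)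
    (hU : ∀ a c, c ∈ nexts a → c ∈ U) :
    ∀ f R, U.countP (fun k => decide (k ∉ R)) < f →
      closNew nexts (closIter nexts f R) = [] := by
  intro f
  induction f with
  | zero => intro R h; omega
  | succ f ih =>
    intro R h
    simp only [closIter]
    split
    · assumption
    · rename_i hn
      apply ih
      have := closNew_decreases nexts U R hU hn
      omega

lemma closed_of_sat {α : Type} [DecidableEq α] {nexts : α → List α} {S : List α}
    (hsat : closNew nexts S = []) {a c : α} (ha : a ∈ S) (hc : c ∈ nexts a) : c ∈ S := by
  by_contra hnot
  have : c ∈ closNew nexts S := by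
    unfold closNew
    rw [List.mem_dedup, List.mem_filter]
    exact ⟨List.mem_flatMap.2 ⟨a, ha, hc⟩, by simpa using hnot⟩
  rw [hsat] at this
  simp at this

lemma closIter_subset_of_closed {α : Type} [DecidableEq α] {nexts : α → List α} {S : List α}
    (hsat : closNew nexts S = []) :
    ∀ f R, (∀ x ∈ R, x ∈ S) → ∀ x ∈ closIter nexts f R, x ∈ S := by
  intro f
  induction f with
  | zero => intro R hRS x hx; exact hRS x hx
  | succ f ih =>
    intro R hRS x hx
    simp only [closIter] at hx
    split at hx
    · exact hRS x hx
    · refine ih _ ?_ x hx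
      intro y hy
      rcases List.mem_append.1 hy with hy | hy
      · exact hRS y hy
      · obtain ⟨hyR, a, haR, hya⟩ := mem_closNew hy
        exact closed_of_sat hsat (hRS a haR) hya

lemma findBranch_mem {trie : List (Int × List (String × Int))} {i : Int} {br : List (String × Int)}
    (h : findBranch trie i = some br) : (i, br) ∈ trie := by
  induction trie with
  | nil => simp [findBranch] at h
  | cons p rest ih =>
    obtain ⟨k, v⟩ := p
    by_cases hk : k = i
    · subst hk; simp [findBranch] at h; simp [h]
    · simp [findBranch, hk] at h; exact List.mem_cons_of_mem _ (ih h)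

lemma findBranch_isSome {trie : List (Int × List (String × Int))} {i : Int}
    (h : i ∈ trie.map Prod.fst) : (findBranch trie i).isSome = true := by
  induction trie with
  | nil => simp at h
  | cons p rest ih =>
    obtain ⟨k, v⟩ := p
    by_cases hk : k = i
    · simp [findBranch, hk]
    · simp [findBranch, hk]
      simp at h
      rcases h with h | h
      · exact absurd h.symm hk
      · exact ih (by simp [h])

lemma findBranch_mem_fst {trie : List (Int × List (String × Int))} {c : Int}
    {br : List (String × Int)} (h : findBranch trie c = some br) : c ∈ trie.map Prod.fst :=
  List.mem_map.2 ⟨(c, br), findBranch_mem h, rfl⟩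

lemma branchOf_eq {trie : List (Int × List (String × Int))} {i : Int} :
    ∀ {br : List (String × Int)}, findBranch trie i = some br → branchOf trie i = br := by
  induction trie with
  | nil => intro br h; simp [findBranch] at h
  | cons p rest ih =>
    intro br h
    obtain ⟨k, v⟩ := p
    by_cases hk : k = i
    · subst hk
      simp [findBranch] at h
      simp [branchOf, h]
    · simp [findBranch, hk] at h
      have := ih h
      simpa [branchOf, List.filter_cons, hk] using this

lemma nextsIdx_mem_keys {trie : List (Int × List (String × Int))} {a c : Int}
    (h : c ∈ nextsIdx trie a) : c ∈ trie.map Prod.fst := by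
  unfold nextsIdx at h
  obtain ⟨q, _, hq⟩ := List.mem_filterMap.1 h
  split at hq
  · cases hq; assumption
  · cases hq

lemma reachSet_sat (trie : List (Int × List (String × Int))) (i : Int) :
    closNew (nextsIdx trie) (reachSet trie i) = [] := by
  apply closNew_closIter_nil (nextsIdx trie) (trie.map Prod.fst)
    (fun a c h => nextsIdx_mem_keys h)
  calc (trie.map Prod.fst).countP (fun k => decide (k ∉ ([i] : List Int)))
      ≤ (trie.map Prod.fst).length := List.countP_le_length
    _ = trie.length := List.length_map _
    _ < trie.length + 1 := by omega

lemma nextsSt_mem_univ {trie : List (Int × List (String × Int))} {a c : Int × Bool}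
    (h : c ∈ nextsSt trie a) : c ∈ (trie.map Prod.fst).flatMap (fun k => [(k, true), (k, false)]) := by
  unfold nextsSt at h
  obtain ⟨q, _, hq⟩ := List.mem_filterMap.1 h
  split at hq
  · rename_i hmem
    cases hq
    apply List.mem_flatMap.2 ⟨q.2, hmem, ?_⟩
    cases ((a.2 || decide (1 < (branchOf trie a.1).length)) && (q.1 == "")) <;> simp
  · cases hq

lemma States_sat (trie : List (Int × List (String × Int))) :
    closNew (nextsSt trie) (States trie) = [] := by
  apply closNew_closIter_nil (nextsSt trie)
    ((trie.map Prod.fst).flatMap (fun k => [(k, true), (k, false)]))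
    (fun a c h => nextsSt_mem_univ h)
  refine lt_of_le_of_lt List.countP_le_length ?_
  have hlen : ∀ l : List Int, (l.flatMap (fun k => [(k, true), (k, false)])).length = 2 * l.length := by
    intro l
    induction l with
    | nil => rfl
    | cons a tl ih => simp [List.flatMap_cons, ih]; omega
  rw [hlen, List.length_map]
  omega

lemma root_mem_States (trie : List (Int × List (String × Int))) :
    ((0 : Int), true) ∈ States trie :=
  subset_closIter _ _ _ _ (List.mem_singleton.2 rfl)

lemma States_closed {trie : List (Int × List (String × Int))} {st ns : Int × Bool}
    (h : st ∈ States trie) (hn : ns ∈ nextsSt trie st) : ns ∈ States trie :=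
  closed_of_sat (States_sat trie) h hn

lemma self_mem_reachSet (trie : List (Int × List (String × Int))) (i : Int) :
    i ∈ reachSet trie i :=
  subset_closIter _ _ _ _ (List.mem_singleton.2 rfl)

lemma child_mem_nextsIdx {trie : List (Int × List (String × Int))} {i : Int}
    {br : List (String × Int)} {q : String × Int} (hfb : findBranch trie i = some br)
    (hq : q ∈ br) (hk : q.2 ∈ trie.map Prod.fst) : q.2 ∈ nextsIdx trie i := by
  unfold nextsIdx
  rw [branchOf_eq hfb]
  exact List.mem_filterMap.2 ⟨q, hq, by simp [hk]⟩

lemma reachSet_child_subset {trie : List (Int × List (String × Int))} {i : Int}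
    {br : List (String × Int)} {q : String × Int} (hfb : findBranch trie i = some br)
    (hq : q ∈ br) (hk : q.2 ∈ trie.map Prod.fst) :
    ∀ x ∈ reachSet trie q.2, x ∈ reachSet trie i := by
  apply closIter_subset_of_closed (reachSet_sat trie i)
  intro x hx
  rw [List.mem_singleton] at hx
  subst hx
  exact closed_of_sat (reachSet_sat trie i) (self_mem_reachSet trie i)
    (child_mem_nextsIdx hfb hq hk)

-- the recursion measure: number of keys reachable from i (strictly decreases along
-- key-to-key edges by Pre_'s acyclicity)
def mcount (trie : List (Int × List (String × Int))) (i : Int) : Nat :=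
  (trie.map Prod.fst).countP (fun k => decide (k ∈ reachSet trie i))

lemma mcount_le (trie : List (Int × List (String × Int))) (i : Int) :
    mcount trie i ≤ trie.length := by
  unfold mcount
  calc (trie.map Prod.fst).countP _ ≤ (trie.map Prod.fst).length := List.countP_le_length
    _ = trie.length := List.length_map _

lemma mcount_pos {trie : List (Int × List (String × Int))} {i : Int}
    (h : i ∈ trie.map Prod.fst) : 1 ≤ mcount trie i := by
  unfold mcount
  have : 0 < (trie.map Prod.fst).countP (fun k => decide (k ∈ reachSet trie i)) :=
    List.countP_pos_iff.2 ⟨i, h, by simp [self_mem_reachSet]⟩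
  omega

lemma mcount_lt {trie : List (Int × List (String × Int))} {i : Int}
    {br : List (String × Int)} {q : String × Int} (hfb : findBranch trie i = some br)
    (hq : q ∈ br) (hk : q.2 ∈ trie.map Prod.fst) (hnc : i ∉ reachSet trie q.2) :
    mcount trie q.2 < mcount trie i := by
  apply countP_lt_of_exists
  · intro x _ hx
    simp only [decide_eq_true_eq] at hx ⊢
    exact reachSet_child_subset hfb hq hk x hx
  · exact ⟨i, findBranch_mem_fst hfb, by simp [self_mem_reachSet], by simpa using hnc⟩

lemma rev_foldl_cons {α β : Type} (l : List α) (h : α → β) (st : List β) :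
    l.reverse.foldl (fun s q => h q :: s) st = l.map h ++ st := by
  induction l generalizing st with
  | nil => simp
  | cons a tl ih => simp [List.foldl_append, ih]

-- convenient restatement of Pre_'s second component at a looked-up branch
lemma pre_at {trie : List (Int × List (String × Int))} (hpre : Pre_Suffix_tree trie)
    {st : Int × Bool} (hst : st ∈ States trie) {br : List (String × Int)}
    (hfb : findBranch trie st.1 = some br) {q : String × Int} (hq : q ∈ br) :
    (q.2 ∈ trie.map Prod.fst → st.1 ∉ reachSet trie q.2) ∧
      (q.2 ∉ trie.map Prod.fst → ¬ ((st.2 = true ∨ 1 < br.length) ∧ q.1 = "")) := by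
  have := hpre.2 st hst q (by rw [branchOf_eq hfb]; exact hq)
  rw [branchOf_eq hfb] at this
  exact this

-- the state pushed for a child matches the text the loop/recursion actually passes
lemma child_flag (t t' : String) (brlen : Nat) (s : String)
    (ht' : t' = if 1 < brlen ∧ t ≠ "" then "" else t) :
    decide (t' ++ s = "") = ((decide (t = "") || decide (1 < brlen)) && (s == "")) := by
  by_cases hb : 1 < brlen ∧ t ≠ ""
  · rw [ht', if_pos hb]
    by_cases hs : s = "" <;> simp [hs, hb.1, hb.2]
  · rw [ht', if_neg hb]
    by_cases ht : t = ""
    · subst ht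
      by_cases hs : s = "" <;> simp [hs]
    · have hnb : ¬ 1 < brlen := fun h => hb ⟨h, ht⟩
      have : t ++ s ≠ "" := by
        intro hc
        apply ht
        rw [← String.toList_eq_nil_iff]
        have h2 : (t ++ s).toList = ([] : List Char) := by simp [hc]
        rw [String.toList_append] at h2
        exact (List.append_eq_nil_iff.mp h2).1
      simp [this, ht, hnb]

lemma child_mem_nextsSt {trie : List (Int × List (String × Int))} {st : Int × Bool}
    {br : List (String × Int)} {q : String × Int} (hfb : findBranch trie st.1 = some br)
    (hq : q ∈ br) (hk : q.2 ∈ trie.map Prod.fst) :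
    (q.2, (st.2 || decide (1 < br.length)) && (q.1 == "")) ∈ nextsSt trie st := by
  unfold nextsSt
  rw [branchOf_eq hfb]
  exact List.mem_filterMap.2 ⟨q, hq, by simp [hk]⟩

-- dfsA's value is independent of the fuel once it exceeds mcount (under Pre_)
lemma dfs_stab (trie : List (Int × List (String × Int))) (hpre : Pre_Suffix_tree trie) :
    ∀ k f f' i t, ((findBranch trie i).isSome = true → ∃ e, (i, e) ∈ States trie) →
      mcount trie i ≤ k → k + 1 ≤ f → k + 1 ≤ f' →
      dfsA trie f i t = dfsA trie f' i t := by
  intro k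
  induction k using Nat.strong_induction_on with
  | _ k IH =>
    intro f f' i t hstate hk hf hf'
    obtain ⟨fa, rfl⟩ : ∃ fa, f = fa + 1 := ⟨f - 1, by omega⟩
    obtain ⟨fb, rfl⟩ : ∃ fb, f' = fb + 1 := ⟨f' - 1, by omega⟩
    cases hfb : findBranch trie i with
    | none => simp only [dfsA, hfb]
    | some br =>
      simp only [dfsA, hfb]
      obtain ⟨e, hst⟩ := hstate (by rw [hfb]; rfl)
      have hkey : i ∈ trie.map Prod.fst := findBranch_mem_fst hfb
      have hpos : 1 ≤ mcount trie i := mcount_pos hkey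
      congr 1
      apply PySem.List.foldl_congr_mem
      intro acc q hq
      congr 1
      cases hfc : findBranch trie q.2 with
      | none =>
        obtain ⟨fa', rfl⟩ : ∃ x, fa = x + 1 := ⟨fa - 1, by omega⟩
        obtain ⟨fb', rfl⟩ : ∃ x, fb = x + 1 := ⟨fb - 1, by omega⟩
        simp only [dfsA, hfc]
      | some br2 =>
        have hck : q.2 ∈ trie.map Prod.fst := findBranch_mem_fst hfc
        have hnc := (pre_at hpre hst hfb hq).1 hck
        have hlt : mcount trie q.2 < mcount trie i := mcount_lt hfb hq hck hnc
        exact IH (mcount trie q.2) (by omega) fa fb q.2 _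
          (fun _ => ⟨_, States_closed hst (child_mem_nextsSt hfb hq hck)⟩)
          le_rfl (by omega) (by omega)

-- same stability for the loop fuel
lemma cost_stab (trie : List (Int × List (String × Int))) (hpre : Pre_Suffix_tree trie) :
    ∀ k f f' i, ((findBranch trie i).isSome = true → ∃ e, (i, e) ∈ States trie) →
      mcount trie i ≤ k → k + 1 ≤ f → k + 1 ≤ f' →
      costF trie f i = costF trie f' i := by
  intro k
  induction k using Nat.strong_induction_on with
  | _ k IH =>
    intro f f' i hstate hk hf hf'
    obtain ⟨fa, rfl⟩ : ∃ fa, f = fa + 1 := ⟨f - 1, by omega⟩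
    obtain ⟨fb, rfl⟩ : ∃ fb, f' = fb + 1 := ⟨f' - 1, by omega⟩
    cases hfb : findBranch trie i with
    | none => simp only [costF, hfb]
    | some br =>
      simp only [costF, hfb]
      obtain ⟨e, hst⟩ := hstate (by rw [hfb]; rfl)
      have hkey : i ∈ trie.map Prod.fst := findBranch_mem_fst hfb
      have hpos : 1 ≤ mcount trie i := mcount_pos hkey
      congr 2
      apply List.map_congr_left
      intro q hq
      cases hfc : findBranch trie q.2 with
      | none =>
        obtain ⟨fa', rfl⟩ : ∃ x, fa = x + 1 := ⟨fa - 1, by omega⟩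
        obtain ⟨fb', rfl⟩ : ∃ x, fb = x + 1 := ⟨fb - 1, by omega⟩
        simp only [costF, hfc]
      | some br2 =>
        have hck : q.2 ∈ trie.map Prod.fst := findBranch_mem_fst hfc
        have hnc := (pre_at hpre hst hfb hq).1 hck
        have hlt : mcount trie q.2 < mcount trie i := mcount_lt hfb hq hck hnc
        exact IH (mcount trie q.2) (by omega) fa fb q.2
          (fun _ => ⟨_, States_closed hst (child_mem_nextsSt hfb hq hck)⟩)
          le_rfl (by omega) (by omega)

lemma costF_pos (trie : List (Int × List (String × Int))) (f : Nat) (i : Int) :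
    1 ≤ costF trie f i := by
  cases f with
  | zero => simp [costF]
  | succ g =>
    simp only [costF]
    cases findBranch trie i <;> simp

-- stack-frame invariant: enough fuel, the frame is a visited DFS state (when its index is
-- a key), and a missing index always carries nonempty text
def FrameOK (trie : List (Int × List (String × Int))) (fA : Nat) (fr : Int × String) : Prop :=
  1 ≤ fA ∧ ((findBranch trie fr.1).isSome = true → mcount trie fr.1 + 1 ≤ fA) ∧
    ((findBranch trie fr.1).isSome = true → (fr.1, decide (fr.2 = "")) ∈ States trie) ∧
    ((findBranch trie fr.1).isSome = false → fr.2 ≠ "")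

-- main correspondence: the stack machine flushes the stack frame by frame,
-- each frame contributing exactly its recursive-DFS output
lemma loop_eq (trie : List (Int × List (String × Int))) (hpre : Pre_Suffix_tree trie) (fA : Nat) :
    ∀ fB stack res, (∀ fr ∈ stack, FrameOK trie fA fr) →
      (stack.map (fun fr => costF trie fA fr.1)).sum ≤ fB →
      loopB trie fB stack res = res ++ (stack.map (fun fr => dfsA trie fA fr.1 fr.2)).flatten := by
  intro fB
  induction fB with
  | zero =>
    intro stack res hok hcost
    cases stack with
    | nil => simp [loopB]
    | cons fr rest =>
      exfalso
      have := costF_pos trie fA fr.1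
      simp at hcost
      omega
  | succ g IH =>
    intro stack res hok hcost
    cases stack with
    | nil => simp [loopB]
    | cons fr rest =>
      obtain ⟨i, t⟩ := fr
      obtain ⟨hone, hfuel, hstate, hmiss⟩ := hok (i, t) (List.mem_cons_self)
      obtain ⟨fa, hfa⟩ : ∃ fa, fA = fa + 1 := ⟨fA - 1, by omega⟩
      cases hfb : findBranch trie i with
      | none =>
        simp only [loopB, hfb]
        have ht : t ≠ "" := hmiss (by rw [hfb]; rfl)
        rw [if_pos ht]
        have hc1 : costF trie fA i = 1 := by rw [hfa]; simp only [costF, hfb]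
        rw [IH rest (res ++ [t]) (fun fr hm => hok fr (List.mem_cons_of_mem _ hm))
            (by simp at hcost ⊢; omega)]
        have hdfs : dfsA trie fA i t = [t] := by
          rw [hfa]; simp only [dfsA, hfb]; rw [if_pos ht]
        simp [hdfs]
      | some br =>
        simp only [loopB, hfb]
        have hst : (i, decide (t = "")) ∈ States trie := hstate (by rw [hfb]; rfl)
        have hkey : i ∈ trie.map Prod.fst := findBranch_mem_fst hfb
        have hfuelK : mcount trie i + 1 ≤ fA := hfuel (by rw [hfb]; rfl)
        have hpos : 1 ≤ mcount trie i := mcount_pos hkey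
        rw [rev_foldl_cons]
        set t' := if 1 < br.length ∧ t ≠ "" then "" else t with ht'
        set res' := if 1 < br.length ∧ t ≠ "" then res ++ [t] else res with hres'
        -- the pushed children frames
        have hchildOK : ∀ q ∈ br, FrameOK trie fA (q.2, t' ++ q.1) := by
          intro q hq
          have hpq := pre_at hpre hst hfb hq
          refine ⟨hone, ?_, ?_, ?_⟩
          · intro hs
            obtain ⟨br2, hfc⟩ := Option.isSome_iff_exists.mp hs
            have hck := findBranch_mem_fst hfc
            have := mcount_lt hfb hq hck (hpq.1 hck)
            show mcount trie q.2 + 1 ≤ fA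
            omega
          · intro hs
            obtain ⟨br2, hfc⟩ := Option.isSome_iff_exists.mp hs
            have hck := findBranch_mem_fst hfc
            have hmem := States_closed hst (child_mem_nextsSt hfb hq hck)
            show (q.2, decide (t' ++ q.1 = "")) ∈ States trie
            rw [child_flag t t' br.length q.1 ht']
            exact hmem
          · intro hs
            have hs' : (findBranch trie q.2).isSome = false := hs
            have hck : q.2 ∉ trie.map Prod.fst := by
              intro hm
              rw [findBranch_isSome hm] at hs'
              cases hs'
            have hbad := hpq.2 hck
            show t' ++ q.1 ≠ ""
            intro hc
            have hflag := child_flag t t' br.length q.1 ht'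
            rw [hc] at hflag
            simp only [decide_true] at hflag
            have h3 := hflag.symm
            rw [Bool.and_eq_true, Bool.or_eq_true] at h3
            obtain ⟨h1, h2⟩ := h3
            apply hbad
            refine ⟨?_, by simpa using h2⟩
            rcases h1 with h1 | h1
            · exact Or.inl h1
            · exact Or.inr (by simpa using h1)
        have hok' : ∀ x ∈ br.map (fun q => (q.2, t' ++ q.1)) ++ rest, FrameOK trie fA x := by
          intro x hx
          rcases List.mem_append.1 hx with hx | hx
          · obtain ⟨q, hq, rfl⟩ := List.mem_map.1 hx
            exact hchildOK q hq
          · exact hok x (List.mem_cons_of_mem _ hx)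
        -- per-child fuel stability (dfs and cost)
        have hstab : ∀ q ∈ br, dfsA trie fa q.2 (t' ++ q.1) = dfsA trie fA q.2 (t' ++ q.1) := by
          intro q hq
          cases hfc : findBranch trie q.2 with
          | none =>
            obtain ⟨fa', rfl⟩ : ∃ x, fa = x + 1 := ⟨fa - 1, by omega⟩
            rw [hfa]
            simp only [dfsA, hfc]
          | some br2 =>
            have hck := findBranch_mem_fst hfc
            have hlt := mcount_lt hfb hq hck ((pre_at hpre hst hfb hq).1 hck)
            exact dfs_stab trie hpre (mcount trie q.2) fa fA q.2 _
              (fun _ => ⟨_, States_closed hst (child_mem_nextsSt hfb hq hck)⟩) le_rfl (by omega)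
              (by omega)
        have hcstab : ∀ q ∈ br, costF trie fa q.2 = costF trie fA q.2 := by
          intro q hq
          cases hfc : findBranch trie q.2 with
          | none =>
            obtain ⟨fa', rfl⟩ : ∃ x, fa = x + 1 := ⟨fa - 1, by omega⟩
            rw [hfa]
            simp only [costF, hfc]
          | some br2 =>
            have hck := findBranch_mem_fst hfc
            have hlt := mcount_lt hfb hq hck ((pre_at hpre hst hfb hq).1 hck)
            exact cost_stab trie hpre (mcount trie q.2) fa fA q.2
              (fun _ => ⟨_, States_closed hst (child_mem_nextsSt hfb hq hck)⟩) le_rfl (by omega)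
              (by omega)
        -- fuel accounting
        have hcosteq : costF trie fA i = 1 + (br.map (fun q => costF trie fA q.2)).sum := by
          conv_lhs => rw [hfa]
          simp only [costF, hfb]
          congr 1
          exact congrArg List.sum (List.map_congr_left hcstab)
        have hcost' : ((br.map (fun q => (q.2, t' ++ q.1)) ++ rest).map
            (fun fr => costF trie fA fr.1)).sum ≤ g := by
          simp only [List.map_append, List.sum_append, List.map_map] at hcost ⊢
          simp only [List.map_cons, List.sum_cons] at hcost
          have : (br.map ((fun fr => costF trie fA fr.1) ∘ fun q => (q.2, t' ++ q.1))).sum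
              = (br.map (fun q => costF trie fA q.2)).sum := by
            congr 1
          omega
        rw [IH _ res' hok' hcost']
        -- now compute dfsA on this frame
        have hdfs : dfsA trie fA i t =
            (if 1 < br.length ∧ t ≠ "" then [t] else []) ++
              br.flatMap (fun q => dfsA trie fA q.2 (t' ++ q.1)) := by
          conv_lhs => rw [hfa]
          simp only [dfsA, hfb]
          rw [← ht']
          rw [PySem.List.foldl_append_eq_flatMap]
          simp only [List.nil_append]
          congr 1
          exact List.flatMap_congr hstab
        simp only [List.map_cons, List.flatten_cons, hdfs, List.map_append, List.map_map,
          List.flatten_append]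
        have hmapeq : (br.map ((fun fr => dfsA trie fA fr.1 fr.2) ∘ fun q => (q.2, t' ++ q.1)))
            = br.map (fun q => dfsA trie fA q.2 (t' ++ q.1)) := rfl
        rw [hmapeq]
        rw [List.flatMap_def]
        rw [hres']
        split_ifs <;> simp

-- ===== VERDICT (by name: the statement is the Claim_ definition above) =====
theorem Suffix_tree_spec : Claim_equal_Suffix_tree := by
  intro trie _ hpre
  unfold Spec_Suffix_tree Suffix_tree Suffix_tree_alt
  have hroot := hpre.1
  have hsome := findBranch_isSome hroot
  rw [loop_eq trie hpre (trie.length + 1) (costF trie (trie.length + 1) 0) [(0, "")] []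
      (by
        intro fr hfr
        simp at hfr
        subst hfr
        refine ⟨by omega, fun _ => ?_, fun _ => by simpa using root_mem_States trie,
          fun h => by rw [hsome] at h; exact absurd h (by simp)⟩
        show mcount trie 0 + 1 ≤ trie.length + 1
        have := mcount_le trie 0
        omega)
      (by simp)]
  simp
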